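-- pv_equiv track=rewrite | github.com/Muna-Lombe/python-programs | reverse string.py | is_sentence
-- ===== SOURCE A (Python) =====
-- def is_sentence(s):
--     h=0
--     for i in s.split():
--         h+=1
--     if h>1:
--         return True
--     else:
--         return False
-- ===== SOURCE B (Python) =====
-- def is_sentence(s):
--     count = 0
--     in_word = False
--     for ch in s:
--         if ch.isspace():
--             in_word = False
--         else:
--             if not in_word:
--                 count += 1
--                 if count == 2:
--                     return True
--             in_word = True
--     return count > 1
-- ===== Notes on version B (the rewrite author's own statement) =====
-- stated objective: alternative
-- what changed: Instead of building the token list with s.split() and counting it, B makes one pass over the characters, counting whitespace-to-non-whitespace transitions and returning True as soon as a second word starts.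
import Mathlib
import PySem

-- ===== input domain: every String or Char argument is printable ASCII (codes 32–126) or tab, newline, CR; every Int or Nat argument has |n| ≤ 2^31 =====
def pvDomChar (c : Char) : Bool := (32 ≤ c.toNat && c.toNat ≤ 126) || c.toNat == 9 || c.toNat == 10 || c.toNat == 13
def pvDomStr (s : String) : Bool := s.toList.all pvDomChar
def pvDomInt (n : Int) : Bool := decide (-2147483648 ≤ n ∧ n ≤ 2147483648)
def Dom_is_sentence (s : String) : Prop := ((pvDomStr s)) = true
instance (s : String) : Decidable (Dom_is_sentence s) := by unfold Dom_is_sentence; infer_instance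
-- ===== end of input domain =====

-- B replaces split()+count with a single character pass counting word starts (early exit at the second word); alternative decomposition, same asymptotic cost.


-- ===== PORT A =====
-- h = 0; for i in s.split(): h += 1; return True if h > 1 else False
def is_sentence (s : String) : Bool :=
  let h : Int := (PySem.Str.split₀ s).foldl (fun h _ => h + 1) 0
  if h > 1 then true else false

-- ===== PORT B =====
-- the for-loop of Source B: state (in_word, count), early return True when count reaches 2
def pvCountWords : List Char → Bool → Int → Bool
  | [], _, count => decide (count > 1)
  | c :: rest, inWord, count =>
    if PySem.Chars.isspace c then pvCountWords rest false count
    else if !inWord then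
      (if count + 1 = 2 then true else pvCountWords rest true (count + 1))
    else pvCountWords rest true count

def is_sentence_alt (s : String) : Bool := pvCountWords s.toList false 0

-- ===== PRECONDITION & SPEC =====
def Spec_is_sentence (s : String) (out : Bool) : Prop := out = is_sentence_alt s
instance (s : String) (out : Bool) : Decidable (Spec_is_sentence s out) := by unfold Spec_is_sentence; infer_instance

-- ===== CLAIM (what is proved, stated in full; the proofs are below) =====
def Claim_equal_is_sentence : Prop := ∀ (s : String), Dom_is_sentence s → Spec_is_sentence s (is_sentence s)

-- ===== LEMMAS AND PROOFS =====

-- number of word starts in `rest`, given whether a word is already in progress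
def pvNW : List Char → Bool → Nat
  | [], _ => 0
  | c :: rest, inW =>
    if PySem.Chars.isspace c then pvNW rest false
    else if inW then pvNW rest true else pvNW rest true + 1

theorem pvGo_length (rest : List Char) : ∀ (cur : List Char) (acc : List (List Char)),
    (PySem.Chars.split₀.go rest cur acc).length
      = acc.length + (if cur.isEmpty then 0 else 1) + pvNW rest (!cur.isEmpty) := by
  induction rest with
  | nil =>
    intro cur acc
    by_cases h : cur.isEmpty <;> simp [PySem.Chars.split₀.go, pvNW, h]
  | cons c rest ih =>
    intro cur acc
    by_cases hs : PySem.Chars.isspace c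
    · by_cases h : cur.isEmpty
      · simp [PySem.Chars.split₀.go, pvNW, hs, h, ih]
      · simp [PySem.Chars.split₀.go, pvNW, hs, h, ih]
    · by_cases h : cur.isEmpty
      · simp [PySem.Chars.split₀.go, pvNW, hs, h, ih (c :: cur) acc]
        omega
      · simp [PySem.Chars.split₀.go, pvNW, hs, h, ih (c :: cur) acc]

theorem pvScan_eq (cs : List Char) : ∀ (inW : Bool) (count : Int),
    0 ≤ count → count ≤ 1 →
    pvCountWords cs inW count = decide (count + (pvNW cs inW : Int) > 1) := by
  induction cs with
  | nil => intro inW count _ _; simp [pvCountWords, pvNW]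
  | cons c rest ih =>
    intro inW count h0 h1
    by_cases hs : PySem.Chars.isspace c
    · simp [pvCountWords, pvNW, hs, ih false count h0 h1]
    · cases inW with
      | true => simp [pvCountWords, pvNW, hs, ih true count h0 h1]
      | false =>
        by_cases h2 : count + 1 = 2
        · have hnw : (0 : Int) ≤ (pvNW rest true : Int) := by positivity
          simp [pvCountWords, pvNW, hs, h2]
          omega
        · have := ih true (count + 1) (by omega) (by omega)
          simp [pvCountWords, pvNW, hs, h2, this]
          constructor <;> intro <;> omega

theorem pvFoldl_count (l : List String) : ∀ (n : Int),
    l.foldl (fun h _ => h + 1) n = n + l.length := by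
  induction l with
  | nil => intro n; simp
  | cons x xs ih => intro n; simp [List.foldl, ih]; omega

theorem pvA_eq (s : String) : is_sentence s = decide ((pvNW s.toList false : Int) > 1) := by
  have hlen : (PySem.Str.split₀ s).length = pvNW s.toList false := by
    have := congrArg List.length (PySem.Str.split₀_map_toList s)
    simp only [List.length_map] at this
    rw [this]
    show (PySem.Chars.split₀.go s.toList [] []).length = _
    simpa using pvGo_length s.toList [] []
  simp [is_sentence, pvFoldl_count, hlen]

-- ===== VERDICT (by name: the statement is the Claim_ definition above) =====
theorem is_sentence_spec : Claim_equal_is_sentence := by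
  intro s _
  unfold Spec_is_sentence is_sentence_alt
  rw [pvA_eq, pvScan_eq s.toList false 0 (by omega) (by omega)]
  simp
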